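-- pv_equiv track=rewrite | github.com/DavidSilveira80/Testes-Unitarios_Python | criptografia.py | tres_requisitos
-- ===== SOURCE A (Python) =====
-- def criptografa_char(char: str, flag: str, step: int) -> str:
--     if flag == 'r':
--         cod_ascii = ord(char)
--         char_criptografado = chr(cod_ascii + step)
--     elif flag == 'l':
--         cod_ascii = ord(char)
--         char_criptografado = chr(cod_ascii - step)
--
--     return char_criptografado
--
-- def criptografa_minusculas_maiusculas(texto_entrada: str, flag: str, step: int) -> str:
--     primeira_pasada_minusculas_maiusculas = ''
--     for letra in texto_entrada:
--         if letra.isalpha():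
--             primeira_pasada_minusculas_maiusculas += criptografa_char(letra, flag, step)
--         else:
--             primeira_pasada_minusculas_maiusculas += letra
--
--     return primeira_pasada_minusculas_maiusculas
--
-- def inverte_texto(texto: str) -> str:
--     texto_invertido = ''
--     for index in range(len(texto)):
--         texto_invertido += texto[-(index + 1)]
--
--     return texto_invertido
--
-- def divide_string(texto: str) -> int:
--     metade_da_string = len(texto) // 2
--     return metade_da_string
--
-- def particiona_texto(texto: str, flag_metade: int) -> str:
--     if flag_metade == 1:
--         metade_texto = texto[:divide_string(texto)]
--     elif flag_metade == 2:
--         metade_texto = texto[divide_string(texto):]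
--     return metade_texto
--
-- def tres_requisitos(texto):
--     # Primeiro e segundo requisito satisfeito
--     primeira_passada = criptografa_minusculas_maiusculas(texto, 'r', 3)
--     segunda_passada = inverte_texto(primeira_passada)
--
--     # Processamento e conclusão do 3 e ultimo requisito
--     primeira_metade_do_texto = particiona_texto(segunda_passada, 1)
--     segunda_metade_do_texto = particiona_texto(segunda_passada, 2)
--
--     criptografada_segunda_metdade_do_texto_1_esquerda = ''
--     for char in segunda_metade_do_texto:
--         criptografada_segunda_metdade_do_texto_1_esquerda += criptografa_char(char, 'l', 1)
--
--     return primeira_metade_do_texto + criptografada_segunda_metdade_do_texto_1_esquerda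
-- ===== SOURCE B (Python) =====
-- def tres_requisitos(texto):
--     m = len(texto) // 2
--     out = []
--     for i, ch in enumerate(reversed(texto)):
--         c = ord(ch) + 3 if ch.isalpha() else ord(ch)
--         if i >= m:
--             c -= 1
--         out.append(chr(c))
--     return ''.join(out)
-- ===== Notes on version B (the rewrite author's own statement) =====
-- stated objective: simpler
-- what changed: Replaces A's four helper passes (per-char Caesar cipher, index-based reversal, two slicing calls, second re-cipher loop) with a single indexed pass over the reversed string that applies both shifts at once.
import Mathlib
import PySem

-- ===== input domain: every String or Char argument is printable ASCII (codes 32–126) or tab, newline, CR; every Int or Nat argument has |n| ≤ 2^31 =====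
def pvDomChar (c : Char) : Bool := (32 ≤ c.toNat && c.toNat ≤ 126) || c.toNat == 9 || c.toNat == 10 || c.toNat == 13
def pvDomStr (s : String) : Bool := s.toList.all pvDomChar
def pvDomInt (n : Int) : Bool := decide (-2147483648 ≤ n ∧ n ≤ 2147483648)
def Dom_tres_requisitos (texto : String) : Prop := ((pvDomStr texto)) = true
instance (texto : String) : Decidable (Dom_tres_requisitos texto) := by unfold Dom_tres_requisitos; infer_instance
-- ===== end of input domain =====

-- B fuses A's four helper passes (cipher, index reversal, slicing, second cipher loop) into one
-- indexed pass over the reversed string; objective: simpler.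

-- ===== PORT A =====
-- chr(ord ± step); exact for the in-range codes A's calls produce (flags are only ever 'r'/'l')
def criptografa_char (char : Char) (flag : String) (step : Int) : Char :=
  if flag = "r" then Char.ofNat ((char.toNat : Int) + step).toNat
  else Char.ofNat ((char.toNat : Int) - step).toNat

def criptografa_minusculas_maiusculas (texto_entrada : List Char) (flag : String) (step : Int) : List Char :=
  texto_entrada.foldl
    (fun acc letra =>
      if PySem.Chars.isalpha letra then acc ++ [criptografa_char letra flag step]
      else acc ++ [letra]) []

def inverte_texto (texto : List Char) : List Char :=
  (PySem.List.pyRange 0 texto.length 1).foldl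
    (fun acc index => acc ++ [PySem.List.pyGetD texto (-(index + 1)) ' ']) []

def divide_string (texto : List Char) : Int := PySem.Int.floordiv texto.length 2

def particiona_texto (texto : List Char) (flag_metade : Int) : List Char :=
  if flag_metade = 1 then PySem.List.slice texto none (some (divide_string texto))
  else if flag_metade = 2 then PySem.List.slice texto (some (divide_string texto)) none
  else []  -- unreachable: A only calls with 1 or 2

def tres_requisitos (texto : String) : String :=
  let primeira_passada := criptografa_minusculas_maiusculas texto.toList "r" 3
  let segunda_passada := inverte_texto primeira_passada
  let primeira_metade := particiona_texto segunda_passada 1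
  let segunda_metade := particiona_texto segunda_passada 2
  let cript := segunda_metade.foldl (fun acc c => acc ++ [criptografa_char c "l" 1]) []
  String.ofList (primeira_metade ++ cript)

-- ===== PORT B =====
-- per-iteration body of B's single loop: +3 on letters, extra −1 in the second half of the reversed text
def bStep (m : Int) (p : Int × Char) : Char :=
  let c : Int := if PySem.Chars.isalpha p.2 then (p.2.toNat : Int) + 3 else (p.2.toNat : Int)
  let c := if p.1 ≥ m then c - 1 else c
  Char.ofNat c.toNat

def tres_requisitos_alt (texto : String) : String :=
  let t := texto.toList
  let m : Int := PySem.Int.floordiv t.length 2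
  String.ofList ((PySem.List.enumerate t.reverse 0).foldl (fun acc p => acc ++ [bStep m p]) [])

-- ===== PRECONDITION & SPEC =====
def Spec_tres_requisitos (texto : String) (out : String) : Prop := out = tres_requisitos_alt texto
instance (texto : String) (out : String) : Decidable (Spec_tres_requisitos texto out) := by unfold Spec_tres_requisitos; infer_instance

-- ===== CLAIM (what is proved, stated in full; the proofs are below) =====
def Claim_equal_tres_requisitos : Prop := ∀ (texto : String), Dom_tres_requisitos texto → Spec_tres_requisitos texto (tres_requisitos texto)

-- ===== LEMMAS AND PROOFS =====

-- A's first-pass character map and second-pass character map, as plain functions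
def fA (c : Char) : Char := if PySem.Chars.isalpha c then Char.ofNat (c.toNat + 3) else c
def gA (c : Char) : Char := Char.ofNat ((c.toNat : Int) - 1).toNat

lemma toNat_ofNat_small : ∀ n < 131, (Char.ofNat n).toNat = n := by decide

lemma pass1_eq (t : List Char) : criptografa_minusculas_maiusculas t "r" 3 = t.map fA := by
  unfold criptografa_minusculas_maiusculas
  have h : (fun (acc : List Char) letra =>
      if PySem.Chars.isalpha letra then acc ++ [criptografa_char letra "r" 3]
      else acc ++ [letra]) = fun acc letra => acc ++ [fA letra] := by
    funext acc letra
    by_cases hl : PySem.Chars.isalpha letra <;>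
      simp [hl, criptografa_char, fA, show ((letra.toNat : Int) + 3).toNat = letra.toNat + 3 by omega]
  rw [h, PySem.List.foldl_append_singleton_eq_map]
  simp

lemma inverte_eq (t : List Char) : inverte_texto t = t.reverse := by
  unfold inverte_texto
  rw [PySem.List.pyRange_one]
  rw [List.foldl_map, PySem.List.foldl_append_singleton_eq_map]
  simp only [List.nil_append, Int.sub_zero, Int.toNat_natCast]
  apply List.ext_getElem
  · simp
  · intro i h1 h2
    simp only [List.getElem_map, List.getElem_range, List.getElem_reverse]
    simp only [List.length_map, List.length_range] at h1
    have : -(0 + (i : Int) + 1) = -(((i + 1 : Nat)) : Int) := by push_cast; ring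
    rw [this, PySem.List.pyGetD_neg_natCast t (i + 1) ' ' (by omega) (by omega)]
    congr 1
    omega

lemma divide_eq (t : List Char) : divide_string t = ((t.length / 2 : Nat) : Int) := by
  unfold divide_string
  exact_mod_cast PySem.Int.floordiv_natCast t.length 2

lemma pass2_eq (t : List Char) :
    t.foldl (fun acc c => acc ++ [criptografa_char c "l" 1]) [] = t.map gA := by
  have h : (fun (acc : List Char) c => acc ++ [criptografa_char c "l" 1])
      = fun acc c => acc ++ [gA c] := by
    funext acc c; simp [criptografa_char, gA]
  rw [h, PySem.List.foldl_append_singleton_eq_map]; simp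

-- A's two slicing calls in closed form
lemma part1_eq (t : List Char) : particiona_texto t 1 = t.take (t.length / 2) := by
  unfold particiona_texto
  rw [if_pos rfl, divide_eq, PySem.List.slice_to _ (by positivity)]
  simp
  omega

lemma part2_eq (t : List Char) : particiona_texto t 2 = t.drop (t.length / 2) := by
  unfold particiona_texto
  rw [if_neg (by decide : ¬ (2 : Int) = 1), if_pos rfl, divide_eq,
    PySem.List.slice_from _ (by positivity)]
  simp
  omega

-- A's result in closed form
lemma tres_requisitos_eq (texto : String) :
    tres_requisitos texto =
      String.ofList (((texto.toList.map fA).reverse.take (texto.toList.length / 2))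
        ++ ((texto.toList.map fA).reverse.drop (texto.toList.length / 2)).map gA) := by
  unfold tres_requisitos
  simp only [pass1_eq, inverte_eq, part1_eq, part2_eq, pass2_eq, List.length_reverse,
    List.length_map]

lemma bStep_eq (m : Int) (p : Int × Char) :
    bStep m p = if p.1 ≥ m
      then Char.ofNat ((if PySem.Chars.isalpha p.2 then (p.2.toNat : Int) + 3 else (p.2.toNat : Int)) - 1).toNat
      else Char.ofNat (if PySem.Chars.isalpha p.2 then (p.2.toNat : Int) + 3 else (p.2.toNat : Int)).toNat := by
  unfold bStep
  by_cases h : p.1 ≥ m <;> simp [h]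

-- B's single loop, split at position m of the enumeration
lemma bStep_split (m : Int) (l : List Char) : ∀ (s : Int),
    (PySem.List.enumerate l s).map (bStep m)
      = (l.take (m - s).toNat).map
          (fun c => Char.ofNat (if PySem.Chars.isalpha c then (c.toNat : Int) + 3 else (c.toNat : Int)).toNat)
        ++ (l.drop (m - s).toNat).map
          (fun c => Char.ofNat ((if PySem.Chars.isalpha c then (c.toNat : Int) + 3 else (c.toNat : Int)) - 1).toNat) := by
  induction l with
  | nil => intro s; simp [PySem.List.enumerate]
  | cons x xs ih =>
    intro s
    simp only [PySem.List.enumerate_cons, List.map_cons, bStep_eq]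
    by_cases hs : (s : Int) ≥ m
    · have h0 : (m - s).toNat = 0 := by omega
      have h1 : (m - (s + 1)).toNat = 0 := by omega
      simp [hs, ih (s + 1), h0, h1]
    · have hk : (m - s).toNat = (m - (s + 1)).toNat + 1 := by omega
      simp [hs, ih (s + 1), hk]

-- B's per-character maps coincide with A's
lemma u_eq_fA (c : Char) :
    Char.ofNat (if PySem.Chars.isalpha c then (c.toNat : Int) + 3 else (c.toNat : Int)).toNat = fA c := by
  by_cases h : PySem.Chars.isalpha c
  · simp [h, fA, show ((c.toNat : Int) + 3).toNat = c.toNat + 3 by omega]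
  · simp [h, fA, Char.ofNat_toNat]

lemma v_eq_gA_fA (c : Char) (hc : c.toNat ≤ 126) :
    Char.ofNat ((if PySem.Chars.isalpha c then (c.toNat : Int) + 3 else (c.toNat : Int)) - 1).toNat
      = gA (fA c) := by
  by_cases h : PySem.Chars.isalpha c
  · have h3 : (Char.ofNat (c.toNat + 3)).toNat = c.toNat + 3 := toNat_ofNat_small _ (by omega)
    simp only [h, if_true, fA, gA, h3]
    have he : ((c.toNat : Int) + 3 - 1) = ((c.toNat + 3 : Nat) : Int) - 1 := by push_cast; ring
    rw [he]
  · simp [h, fA, gA]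

lemma dom_char_le {texto : String} (hd : Dom_tres_requisitos texto)
    {c : Char} (hc : c ∈ texto.toList) : c.toNat ≤ 126 := by
  unfold Dom_tres_requisitos pvDomStr at hd
  rw [List.all_eq_true] at hd
  have := hd c hc
  simp [pvDomChar] at this
  omega

-- ===== VERDICT (by name: the statement is the Claim_ definition above) =====
theorem tres_requisitos_spec : Claim_equal_tres_requisitos := by
  intro texto hd
  unfold Spec_tres_requisitos tres_requisitos_alt
  rw [tres_requisitos_eq]
  have hfold := PySem.List.foldl_append_singleton_eq_map
    (bStep (PySem.Int.floordiv texto.toList.length 2)) (PySem.List.enumerate texto.toList.reverse) []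
  simp only [hfold, List.nil_append]
  have hm : PySem.Int.floordiv (texto.toList.length : Int) 2 = ((texto.toList.length / 2 : Nat) : Int) := by
    exact_mod_cast PySem.Int.floordiv_natCast texto.toList.length 2
  rw [hm, bStep_split]
  rw [Int.sub_zero, Int.toNat_natCast, ← List.map_reverse, ← List.map_take, ← List.map_drop,
    List.map_map]
  congr 1
  congr 1
  · -- first halves
    exact List.map_congr_left fun c _ => (u_eq_fA c).symm
  · -- second halves
    apply List.map_congr_left
    intro c hc
    exact (v_eq_gA_fA c (dom_char_le hd (List.mem_reverse.mp (List.mem_of_mem_drop hc)))).symm
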